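-- pv_equiv track=rewrite | github.com/galinaabdurashitova/nouns_clustering | grouping_nouns.py | make_categories
-- ===== SOURCE A (Python) =====
-- def make_categories(noun_lines, filenames, i=0):
--     if i >= len(filenames):
--         return noun_lines
--     mas1 = []
--     mas2 = []
--     n = filenames[i]
--     for element in noun_lines:
--         adjectives = element.split(';')
--         if n[4:-4] in adjectives[1:]:
--             mas1.append(element)
--         else:
--             mas2.append(element)
--     mas1 = make_categories(mas1, filenames, i + 1)
--     mas2 = make_categories(mas2, filenames, i + 1)
--     mas = mas1 + mas2
--     return mas
-- ===== SOURCE B (Python) =====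
-- def make_categories(noun_lines, filenames, i=0):
--     # Precompute each line's adjective set once, then do stable LSD radix-style
--     # partition passes from the last filename back to index i.
--     pairs = [(line, set(line.split(';')[1:])) for line in noun_lines]
--     for j in reversed(range(i, len(filenames))):
--         tok = filenames[j][4:-4]
--         pairs = [p for p in pairs if tok in p[1]] + [p for p in pairs if tok not in p[1]]
--     return [p[0] for p in pairs]
-- ===== Notes on version B (the rewrite author's own statement) =====
-- stated objective: faster
-- what changed: Replaces A's recursive partition (which re-splits every line at every recursion level and scans the adjective list for membership) by a single precomputation of each line's adjective set plus iterative stable partition passes over the filenames from last to first (LSD-radix style), returning identical order.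
-- outside the precondition, e.g. on make_categories(['a;b'], ['xxxxfyyyy'], -2): A raises IndexError, B raises IndexError
import Mathlib
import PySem

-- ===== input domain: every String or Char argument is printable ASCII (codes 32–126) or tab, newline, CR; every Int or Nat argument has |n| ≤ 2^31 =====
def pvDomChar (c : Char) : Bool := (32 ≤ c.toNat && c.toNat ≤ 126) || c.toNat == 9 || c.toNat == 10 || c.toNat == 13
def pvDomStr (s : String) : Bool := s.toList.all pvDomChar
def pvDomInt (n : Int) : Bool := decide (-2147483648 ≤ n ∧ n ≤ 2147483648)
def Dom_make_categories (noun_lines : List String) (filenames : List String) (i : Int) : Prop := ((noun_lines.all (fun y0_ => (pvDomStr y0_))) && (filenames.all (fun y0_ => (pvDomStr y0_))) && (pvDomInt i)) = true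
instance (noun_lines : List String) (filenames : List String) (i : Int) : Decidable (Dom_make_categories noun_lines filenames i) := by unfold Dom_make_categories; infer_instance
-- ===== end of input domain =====

-- B replaces A's recursive re-splitting partition by one precomputation of each
-- line's adjective set plus stable LSD-style partition passes (objective: faster).

-- ===== PORT A =====
def make_categories (noun_lines : List String) (filenames : List String) (i : Int) : List String :=
  if _h : (filenames.length : Int) ≤ i then noun_lines
  else
    let n := (PySem.List.pyGet? filenames i).getD ""   -- getD: Pre_ guarantees the index is in range
    let mas := noun_lines.foldl
      (fun (acc : List String × List String) element =>
        let adjectives := (PySem.Str.split? element ";").getD []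
        if (PySem.List.slice adjectives (some 1) none).contains
             (PySem.Str.slice n (some 4) (some (-4))) then
          (acc.1 ++ [element], acc.2)
        else
          (acc.1, acc.2 ++ [element]))
      ([], [])
    make_categories mas.1 filenames (i + 1) ++ make_categories mas.2 filenames (i + 1)
termination_by (filenames.length - i).toNat
decreasing_by all_goals omega

-- ===== PORT B =====
def make_categories_alt (noun_lines : List String) (filenames : List String) (i : Int) : List String :=
  let pairs : List (String × PySem.Set String) :=
    noun_lines.map (fun line => (line, PySem.Set.ofList (((PySem.Str.split? line ";").getD []).drop 1)))
  let final := ((PySem.List.pyRange i (filenames.length : Int) 1).reverse).foldl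
    (fun ps j =>
      let tok := PySem.Str.slice ((PySem.List.pyGet? filenames j).getD "") (some 4) (some (-4))
      ps.filter (fun p => PySem.Set.contains p.2 tok)
        ++ ps.filter (fun p => !PySem.Set.contains p.2 tok))
    pairs
  final.map Prod.fst

-- ===== PRECONDITION & SPEC =====
-- Pre_ excludes exactly the inputs where A raises IndexError: i below -len(filenames),
-- where filenames[i] (Python negative-index access) is out of range.
def Pre_make_categories (noun_lines : List String) (filenames : List String) (i : Int) : Prop :=
  -(filenames.length : Int) ≤ i
instance (noun_lines : List String) (filenames : List String) (i : Int) : Decidable (Pre_make_categories noun_lines filenames i) := by unfold Pre_make_categories; infer_instance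
def pvWitness_make_categories : List String × List String × Int :=
  (["cat;red;big", "dog;blue", "ant;red"], ["ann-red.txt", "xxx-blue.txt"], 0)

def Spec_make_categories (noun_lines : List String) (filenames : List String) (i : Int) (out : List String) : Prop := out = make_categories_alt noun_lines filenames i
instance (noun_lines : List String) (filenames : List String) (i : Int) (out : List String) : Decidable (Spec_make_categories noun_lines filenames i out) := by unfold Spec_make_categories; infer_instance

-- ===== CLAIM (what is proved, stated in full; the proofs are below) =====
def Claim_equal_make_categories : Prop := ∀ (noun_lines : List String) (filenames : List String) (i : Int), Dom_make_categories noun_lines filenames i → Pre_make_categories noun_lines filenames i → Spec_make_categories noun_lines filenames i (make_categories noun_lines filenames i)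

-- ===== LEMMAS AND PROOFS =====

-- the membership test A performs at level j, as a predicate on a line
def pvPred (filenames : List String) (j : Int) (element : String) : Bool :=
  (PySem.List.slice ((PySem.Str.split? element ";").getD []) (some 1) none).contains
    (PySem.Str.slice ((PySem.List.pyGet? filenames j).getD "") (some 4) (some (-4)))

-- one stable partition pass (match-first) on plain strings
def pvStep (filenames : List String) (xs : List String) (j : Int) : List String :=
  xs.filter (pvPred filenames j) ++ xs.filter (fun e => !pvPred filenames j e)

-- reference form: B's loop carried out on plain strings
def pvRef (noun_lines : List String) (filenames : List String) (i : Int) : List String :=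
  ((PySem.List.pyRange i (filenames.length : Int) 1).reverse).foldl (pvStep filenames) noun_lines

theorem pvFoldl_partition (filenames : List String) (j : Int) (l : List String)
    (a b : List String) :
    l.foldl
      (fun (acc : List String × List String) element =>
        let adjectives := (PySem.Str.split? element ";").getD []
        if (PySem.List.slice adjectives (some 1) none).contains
             (PySem.Str.slice ((PySem.List.pyGet? filenames j).getD "") (some 4) (some (-4))) then
          (acc.1 ++ [element], acc.2)
        else
          (acc.1, acc.2 ++ [element]))
      (a, b)
    = (a ++ l.filter (pvPred filenames j), b ++ l.filter (fun e => !pvPred filenames j e)) := by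
  induction l generalizing a b with
  | nil => simp
  | cons x xs ih =>
    simp only [List.foldl_cons]
    by_cases hx : pvPred filenames j x
    · rw [if_pos (by simpa [pvPred] using hx)]
      rw [ih]
      simp [hx, List.append_assoc]
    · rw [if_neg (by simpa [pvPred] using hx)]
      rw [ih]
      simp [hx, List.append_assoc]

theorem pvStep_filter (filenames : List String) (q : String → Bool) (j : Int)
    (l : List String) :
    (pvStep filenames l j).filter q = pvStep filenames (l.filter q) j := by
  simp only [pvStep, List.filter_append, List.filter_filter]
  congr 1 <;> exact List.filter_congr (fun a _ => by simp [Bool.and_comm])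

theorem pvFilter_foldl (filenames : List String) (q : String → Bool)
    (js : List Int) (l : List String) :
    (js.foldl (pvStep filenames) l).filter q
      = js.foldl (pvStep filenames) (l.filter q) := by
  induction js generalizing l with
  | nil => rfl
  | cons j js ih =>
    simp only [List.foldl_cons]
    rw [ih, pvStep_filter]

theorem pvFilter_pvRef (filenames : List String) (q : String → Bool)
    (l : List String) (k : Int) :
    (pvRef l filenames k).filter q = pvRef (l.filter q) filenames k :=
  pvFilter_foldl filenames q _ l

theorem pvRef_cons (noun_lines : List String) (filenames : List String) (i : Int)
    (h : i < (filenames.length : Int)) :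
    pvRef noun_lines filenames i
      = pvStep filenames (pvRef noun_lines filenames (i + 1)) i := by
  unfold pvRef
  rw [PySem.List.pyRange_one_cons h]
  simp [List.foldl_append]

theorem pvA_eq_ref (noun_lines : List String) (filenames : List String) (i : Int) :
    make_categories noun_lines filenames i = pvRef noun_lines filenames i := by
  by_cases h : (filenames.length : Int) ≤ i
  · rw [make_categories]
    simp only [dif_pos h]
    unfold pvRef
    rw [PySem.List.pyRange_one_eq_nil h]
    rfl
  · rw [make_categories]
    simp only [dif_neg h]
    rw [pvFoldl_partition filenames i noun_lines [] []]
    simp only [List.nil_append]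
    rw [pvA_eq_ref (noun_lines.filter (pvPred filenames i)) filenames (i + 1),
        pvA_eq_ref (noun_lines.filter (fun e => !pvPred filenames i e)) filenames (i + 1)]
    rw [pvRef_cons noun_lines filenames i (by omega)]
    simp only [pvStep]
    rw [pvFilter_pvRef, pvFilter_pvRef]
termination_by (filenames.length - i).toNat
decreasing_by all_goals omega

theorem pvB_eq_ref (noun_lines : List String) (filenames : List String) (i : Int) :
    make_categories_alt noun_lines filenames i = pvRef noun_lines filenames i := by
  have key : ∀ (js : List Int) (xs : List String),
      js.foldl
        (fun ps j =>
          let tok := PySem.Str.slice ((PySem.List.pyGet? filenames j).getD "") (some 4) (some (-4))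
          ps.filter (fun p => PySem.Set.contains p.2 tok)
            ++ ps.filter (fun p => !PySem.Set.contains p.2 tok))
        (xs.map (fun line => (line, PySem.Set.ofList (((PySem.Str.split? line ";").getD []).drop 1))))
      = (js.foldl (pvStep filenames) xs).map
          (fun line => (line, PySem.Set.ofList (((PySem.Str.split? line ";").getD []).drop 1))) := by
    intro js
    induction js with
    | nil => intro xs; rfl
    | cons j js ih =>
      intro xs
      simp only [List.foldl_cons]
      rw [← ih (pvStep filenames xs j)]
      congr 1
      simp only [pvStep, List.map_append, List.filter_map]
      congr 2 <;>
        exact List.filter_congr (fun a _ => by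
          simp [pvPred,
            PySem.List.slice_from_one, List.drop_one])
  simp only [make_categories_alt]
  rw [key]
  simp [pvRef, Function.comp_def]

-- ===== VERDICT (by name: the statement is the Claim_ definition above) =====
theorem make_categories_spec : Claim_equal_make_categories := by
  intro noun_lines filenames i _ _
  unfold Spec_make_categories
  rw [pvA_eq_ref, pvB_eq_ref]
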